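-- pv_equiv track=rewrite | github.com/p-ortega/mf6rtm | src/mf6rtm/utils.py | rearrange_copy_blocks
-- ===== SOURCE A (Python) =====
-- def rearrange_copy_blocks(script):
--     # Split the script into lines
--     lines = script.split('\n')
--     copy_blocks = []
--     # end_blocks = []
--     other_blocks = []
--
--     # Separate the lines into COPY blocks, END blocks, and other blocks
--     for line in lines:
--         if line.startswith('COPY'):
--             copy_blocks.append(line)
--         else:
--             other_blocks.append(line)
--
--     # Combine the blocks, putting the COPY blocks at the end and avoiding consecutive END blocks
--     rearranged_script = []
--     for block in other_blocks + copy_blocks: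
--         rearranged_script.append(block)
--
--     # Join the lines back together into a single script string
--     rearranged_script = '\n'.join(rearranged_script)
--
--     return rearranged_script
-- ===== SOURCE B (Python) =====
-- def rearrange_copy_blocks(script):
--     lines = script.split('\n')
--     return '\n'.join(sorted(lines, key=lambda line: line.startswith('COPY')))
-- ===== Notes on version B (the rewrite author's own statement) =====
-- stated objective: idiomatic
-- what changed: Replaces the explicit two-bucket partition loops and concatenation with a single stable sort keyed on line.startswith('COPY'), which moves COPY lines to the end while preserving order within each group.
import Mathlib
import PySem

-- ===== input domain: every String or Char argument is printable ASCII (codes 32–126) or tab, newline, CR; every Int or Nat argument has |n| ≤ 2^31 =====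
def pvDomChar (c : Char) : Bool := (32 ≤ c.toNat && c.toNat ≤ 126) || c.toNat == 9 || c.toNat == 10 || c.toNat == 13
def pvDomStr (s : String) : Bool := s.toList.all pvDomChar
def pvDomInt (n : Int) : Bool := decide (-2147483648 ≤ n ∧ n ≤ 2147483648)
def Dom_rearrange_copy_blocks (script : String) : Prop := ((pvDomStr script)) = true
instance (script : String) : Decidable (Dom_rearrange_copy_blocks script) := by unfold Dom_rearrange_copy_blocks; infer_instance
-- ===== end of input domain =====

-- B replaces A's explicit two-bucket partition loops with a single stable sort keyed on
-- startswith('COPY') (idiomatic; same return value).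

-- ===== PORT A =====
-- literal transliteration: split on '\n', one loop filling two buckets, a second loop
-- copying other_blocks + copy_blocks into rearranged_script, then '\n'.join
def rearrange_copy_blocks (script : String) : String :=
  let lines := (PySem.Str.split? script "\n").getD []
  let p := lines.foldl
    (fun (acc : List String × List String) line =>
      if PySem.Str.startswith line "COPY" then (acc.1 ++ [line], acc.2)
      else (acc.1, acc.2 ++ [line])) ([], [])
  let rearranged := (p.2 ++ p.1).foldl (fun acc block => acc ++ [block]) ([] : List String)
  PySem.Str.join "\n" rearranged

-- ===== PORT B =====
-- literal transliteration of Source B: '\n'.join(sorted(lines, key=startswith('COPY')))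
def rearrange_copy_blocks_alt (script : String) : String :=
  let lines := (PySem.Str.split? script "\n").getD []
  PySem.Str.join "\n"
    (PySem.List.sorted lines (fun line => PySem.Str.startswith line "COPY"))

-- ===== PRECONDITION & SPEC =====
def Spec_rearrange_copy_blocks (script : String) (out : String) : Prop := out = rearrange_copy_blocks_alt script
instance (script : String) (out : String) : Decidable (Spec_rearrange_copy_blocks script out) := by unfold Spec_rearrange_copy_blocks; infer_instance

-- ===== CLAIM (what is proved, stated in full; the proofs are below) =====
def Claim_equal_rearrange_copy_blocks : Prop := ∀ (script : String), Dom_rearrange_copy_blocks script → Spec_rearrange_copy_blocks script (rearrange_copy_blocks script)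

-- ===== LEMMAS AND PROOFS =====

-- inserting into a (false-keys ++ true-keys) list lands exactly at the boundary / end
theorem insertBy_part {α : Type} (key : α → Bool) (x : α) (os cs : List α)
    (ho : ∀ y ∈ os, key y = false) (hc : ∀ y ∈ cs, key y = true) :
    PySem.List.insertBy (fun a b => decide (key a < key b)) x (os ++ cs) =
      if key x then (os ++ cs) ++ [x] else os ++ x :: cs := by
  cases hx : key x with
  | true =>
    rw [if_pos rfl]
    apply PySem.List.insertBy_of_forall_not_before
    intro y _
    simp only [decide_eq_false_iff_not, Bool.lt_iff, hx]
    tauto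
  | false =>
    rw [if_neg (by simp)]
    induction os with
    | nil =>
      cases cs with
      | nil => simp [PySem.List.insertBy]
      | cons c cs' =>
        have hkc : key c = true := hc c (by simp)
        simp [PySem.List.insertBy, hx, hkc, Bool.lt_iff]
    | cons o os' ih =>
      have hko : key o = false := ho o (by simp)
      have ho' : ∀ y ∈ os', key y = false := fun y hy => ho y (by simp [hy])
      simp only [List.cons_append, PySem.List.insertBy,
        show (decide (key x < key o)) = false by simp [hx, hko],
        Bool.false_eq_true, if_false]
      rw [ih ho']

-- the stable insertion sort with a boolean key is the stable partition
theorem foldl_insertBy_partition {α : Type} (key : α → Bool) :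
    ∀ (xs os cs : List α), (∀ y ∈ os, key y = false) → (∀ y ∈ cs, key y = true) →
    xs.foldl (fun acc x => PySem.List.insertBy (fun a b => decide (key a < key b)) x acc) (os ++ cs)
      = (os ++ xs.filter (fun x => !key x)) ++ (cs ++ xs.filter key) := by
  intro xs
  induction xs with
  | nil => intro os cs _ _; simp
  | cons x xs ih =>
    intro os cs ho hc
    simp only [List.foldl_cons, insertBy_part key x os cs ho hc]
    cases hx : key x with
    | true =>
      rw [if_pos rfl, show (os ++ cs) ++ [x] = os ++ (cs ++ [x]) by simp]
      have hc' : ∀ y ∈ cs ++ [x], key y = true := by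
        intro y hy
        rcases List.mem_append.mp hy with h | h
        · exact hc y h
        · simp_all
      rw [ih os (cs ++ [x]) ho hc']
      simp [hx]
    | false =>
      rw [if_neg (by simp), show os ++ x :: cs = (os ++ [x]) ++ cs by simp]
      have ho' : ∀ y ∈ os ++ [x], key y = false := by
        intro y hy
        rcases List.mem_append.mp hy with h | h
        · exact ho y h
        · simp_all
      rw [ih (os ++ [x]) cs ho' hc]
      simp [hx]

theorem sorted_bool_key {α : Type} (key : α → Bool) (xs : List α) :
    PySem.List.sorted xs key = xs.filter (fun x => !key x) ++ xs.filter key := by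
  rw [PySem.List.sorted_eq_foldl_insertBy]
  simpa using foldl_insertBy_partition key xs [] [] (by simp) (by simp)

-- A's bucket-filling loop computes the two filters
theorem foldl_buckets (key : String → Bool) :
    ∀ (xs : List String) (c o : List String),
    xs.foldl (fun (acc : List String × List String) line =>
        if key line then (acc.1 ++ [line], acc.2) else (acc.1, acc.2 ++ [line])) (c, o)
      = (c ++ xs.filter key, o ++ xs.filter (fun x => !key x)) := by
  intro xs
  induction xs with
  | nil => intro c o; simp
  | cons x xs ih =>
    intro c o
    cases hx : key x with
    | true => simp [List.foldl_cons, hx, ih]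
    | false => simp [List.foldl_cons, hx, ih]

theorem foldl_append_singleton {α : Type} :
    ∀ (xs acc : List α), xs.foldl (fun acc b => acc ++ [b]) acc = acc ++ xs := by
  intro xs
  induction xs with
  | nil => intro acc; simp
  | cons x xs ih => intro acc; simp [ih]

-- ===== VERDICT (by name: the statement is the Claim_ definition above) =====
theorem rearrange_copy_blocks_spec : Claim_equal_rearrange_copy_blocks := by
  intro script _
  unfold Spec_rearrange_copy_blocks rearrange_copy_blocks rearrange_copy_blocks_alt
  simp only [foldl_buckets, foldl_append_singleton, sorted_bool_key, List.nil_append]
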